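-- pv_equiv track=rewrite | github.com/ggnanasekaran77/pythonLearning | exam2.py | solution
-- ===== SOURCE A (Python) =====
-- def solution (A):
--     result = []
--     for i in range(len(A) - 1):
--         start = 0
--         if A[i] == A[i+1]:
--             pass
--         elif A[i] < A[i+1]:
--             if start == 0:
--                 result.append(int(i))
--         else:
--             start = 0
--
--     res = ((''.join(map(str, result))))
--     return int(res)
-- ===== SOURCE B (Python) =====
-- def solution(A):
--     # Scan the adjacent pairs from the END, building the answer back-to-front:
--     # each qualifying index i is placed at the current positional weight, and the
--     # weight grows by one decimal block per appended index.
--     total = 0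
--     weight = 1
--     for i in range(len(A) - 2, -1, -1):
--         if A[i] < A[i + 1]:
--             total += i * weight
--             weight *= 10 ** len(str(i))
--     return total
-- ===== Notes on version B (the rewrite author's own statement) =====
-- stated objective: alternative
-- what changed: A scans forward collecting a list of indices, joins their decimal strings and re-parses with int(); B builds the number back-to-front in one reverse scan, maintaining a (total, positional-weight) pair so no index list, no string and no int() parse exist.
import Mathlib
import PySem

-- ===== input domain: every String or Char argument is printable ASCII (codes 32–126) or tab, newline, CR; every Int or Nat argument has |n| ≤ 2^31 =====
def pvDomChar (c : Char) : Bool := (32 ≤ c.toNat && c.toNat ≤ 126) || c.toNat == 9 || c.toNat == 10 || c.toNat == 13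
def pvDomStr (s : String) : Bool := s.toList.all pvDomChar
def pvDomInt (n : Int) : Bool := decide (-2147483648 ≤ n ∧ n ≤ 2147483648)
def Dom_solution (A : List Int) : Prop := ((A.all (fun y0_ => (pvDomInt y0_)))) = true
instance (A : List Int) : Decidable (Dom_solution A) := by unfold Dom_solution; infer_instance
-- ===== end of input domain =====

-- B replaces A's collect-indices / string-join / int()-parse pipeline by a single reverse
-- scan that assembles the number back-to-front with a (total, positional-weight) pair
-- (objective: alternative).

-- ===== PORT A =====
def solution (A : List Int) : Int :=
  let result : List Int :=
    (PySem.List.pyRange 0 (PySem.List.len A - 1)).foldl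
      (fun result i =>
        let start : Int := 0
        if PySem.List.pyGetD A i 0 = PySem.List.pyGetD A (i + 1) 0 then result
        else if PySem.List.pyGetD A i 0 < PySem.List.pyGetD A (i + 1) 0 then
          (if start = 0 then result ++ [i] else result)
        else result) []
  let res : String := PySem.Str.join "" (result.map PySem.Int.toStr)
  -- int(res): under Pre_ the parse succeeds, so the default of getD is never taken
  (PySem.Int.ofStr? res).getD 0

-- ===== PORT B =====
def solution_alt (A : List Int) : Int :=
  let tw : Int × Int :=
    (PySem.List.pyRange (PySem.List.len A - 2) (-1) (-1)).foldl
      (fun tw i =>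
        if PySem.List.pyGetD A i 0 < PySem.List.pyGetD A (i + 1) 0 then
          -- total += i * weight; weight *= 10 ** len(str(i))
          (tw.1 + i * tw.2, tw.2 * 10 ^ (PySem.Str.len (PySem.Int.toStr i)).toNat)
        else tw) (0, 1)
  tw.1

-- ===== PRECONDITION & SPEC =====
-- the positions k with A[k] < A[k+1] (the indices Python A concatenates)
def ascIdx (A : List Int) : List Nat :=
  (List.range (A.length - 1)).filter (fun k => decide (A.getD k 0 < A.getD (k + 1) 0))

-- Pre_ excludes exactly the inputs on which Python A raises ValueError: those with no
-- ascending adjacent pair (int('') on the empty join) and those whose concatenated index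
-- string exceeds CPython's 4300-digit integer-string conversion limit.
def Pre_solution (A : List Int) : Prop :=
  ascIdx A ≠ [] ∧ ((ascIdx A).map (fun k => (Nat.toDigits 10 k).length)).sum ≤ 4300

instance (A : List Int) : Decidable (Pre_solution A) := by unfold Pre_solution; infer_instance

def pvWitness_solution : List Int := [0, 1]

def Spec_solution (A : List Int) (out : Int) : Prop := out = solution_alt A
instance (A : List Int) (out : Int) : Decidable (Spec_solution A out) := by unfold Spec_solution; infer_instance

-- ===== CLAIM (what is proved, stated in full; the proofs are below) =====
def Claim_equal_solution : Prop := ∀ (A : List Int), Dom_solution A → Pre_solution A → Spec_solution A (solution A)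

-- ===== LEMMAS AND PROOFS =====

-- PySem.Int.ofChars? parses digits via a private helper that cannot be cited by name, so we
-- clone the parser under nameable identifiers and prove the clone pointwise equal to it
-- (ofChars?_eq below); all further parsing facts are proved about the clone.
def myGo : List Char → Bool → Nat → Option Nat
  | [], afterDigit, acc => if afterDigit then some acc else none
  | c :: rest, afterDigit, acc =>
    if c.isDigit then myGo rest true (acc * 10 + (c.toNat - '0'.toNat))
    else if c = '_' ∧ afterDigit = true then
      match rest with
      | d :: _ => if d.isDigit then myGo rest false acc else none
      | [] => none
    else none

def myDigitsVal? : List Char → Option Nat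
  | [] => none
  | cs => myGo cs false 0

def myOfChars? (s : List Char) : Option Int :=
  have cs := ((s.dropWhile PySem.Int.isIntSpace).reverse.dropWhile PySem.Int.isIntSpace).reverse
  match cs with
  | '-' :: ds => Option.map (fun n => -n) do
      let a ← myDigitsVal? ds
      pure (a : Int)
  | '+' :: ds => Option.map (fun n => n) do
      let a ← myDigitsVal? ds
      pure (a : Int)
  | ds => Option.map (fun n => n) do
      let a ← myDigitsVal? ds
      pure (a : Int)

theorem ofChars?_eq (s : List Char) : PySem.Int.ofChars? s = myOfChars? s := by
  simp only [PySem.Int.ofChars?, myOfChars?]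
  split <;> split <;> simp_all <;> congr 1 <;> refine congrFun ?_ _ <;>
    (funext ds; cases ds with
     | nil => rfl
     | cons c cs =>
        show _ = myGo (c :: cs) false 0
        conv_lhs => whnf
        simp only [myGo]
        cases instDecidableEqBool c.isDigit true with
        | isFalse h => simp; exact fun hx => absurd hx h
        | isTrue h =>
          simp only [h, if_pos]
          refine congrFun (congrFun (congrFun ?_ cs) true) _
          funext l b a
          induction l generalizing b a with
          | nil => rfl
          | cons c' tl ih =>
            conv_lhs => whnf
            simp only [myGo]
            cases instDecidableEqBool c'.isDigit true with
            | isTrue h' => simp only [h', if_pos]; exact ih _ _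
            | isFalse h' =>
              simp only [if_neg h']
              by_cases hu : c' = '_' ∧ b = true
              · simp only [if_pos hu]
                cases tl with
                | nil => rfl
                | cons d tl' =>
                  cases instDecidableEqBool d.isDigit true with
                  | isTrue hd => simp only [hd, if_pos]; exact ih _ _
                  | isFalse hd => simp only [if_neg hd]
              · simp only [if_neg hu])

-- the digit-accumulating step of the parser
def dstep (a : Nat) (c : Char) : Nat := a * 10 + (c.toNat - 48)

theorem myGo_digits (ds : List Char) (a : Nat) (h : ∀ c ∈ ds, c.isDigit = true) :
    myGo ds true a = some (ds.foldl dstep a) := by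
  induction ds generalizing a with
  | nil => rfl
  | cons c tl ih =>
    have hc : c.isDigit = true := h c (List.mem_cons_self ..)
    simp only [myGo, hc, if_pos, List.foldl_cons]
    exact ih _ (fun d hd => h d (List.mem_cons_of_mem _ hd))

theorem myDigitsVal?_digits (ds : List Char) (hne : ds ≠ [])
    (h : ∀ c ∈ ds, c.isDigit = true) :
    myDigitsVal? ds = some (ds.foldl dstep 0) := by
  cases ds with
  | nil => exact absurd rfl hne
  | cons c tl =>
    have hc : c.isDigit = true := h c (List.mem_cons_self ..)
    show myGo (c :: tl) false 0 = _
    simp only [myGo, hc, if_pos, List.foldl_cons]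
    have h0 : (0 : Nat) * 10 + (c.toNat - '0'.toNat) = dstep 0 c := by simp [dstep]
    rw [h0]
    exact myGo_digits _ _ (fun d hd => h d (List.mem_cons_of_mem _ hd))

theorem isIntSpace_of_digit (c : Char) (h : c.isDigit = true) :
    PySem.Int.isIntSpace c = false := by
  simp only [PySem.Int.isIntSpace, Bool.or_eq_false_iff, decide_eq_false_iff_not]
  refine ⟨⟨⟨⟨⟨?_, ?_⟩, ?_⟩, ?_⟩, ?_⟩, ?_⟩ <;> (rintro rfl; exact absurd h (by decide))

theorem myOfChars?_digits (ds : List Char) (hne : ds ≠ [])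
    (h : ∀ c ∈ ds, c.isDigit = true) :
    myOfChars? ds = some ((ds.foldl dstep 0 : Nat) : Int) := by
  have hdrop : ds.dropWhile PySem.Int.isIntSpace = ds := by
    cases ds with
    | nil => rfl
    | cons c tl =>
      rw [List.dropWhile_cons_of_neg]
      simp [isIntSpace_of_digit c (h c (List.mem_cons_self ..))]
  have hdrop2 : ds.reverse.dropWhile PySem.Int.isIntSpace = ds.reverse := by
    cases hrev : ds.reverse with
    | nil => rfl
    | cons e es =>
      rw [List.dropWhile_cons_of_neg]
      have he : e ∈ ds := by
        have : e ∈ ds.reverse := by rw [hrev]; exact List.mem_cons_self ..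
        simpa using this
      simp [isIntSpace_of_digit e (h e he)]
  have hval := myDigitsVal?_digits ds hne h
  simp only [myOfChars?, hdrop, hdrop2, List.reverse_reverse]
  split
  · exact absurd (h '-' (List.mem_cons_self ..)) (by decide)
  · exact absurd (h '+' (List.mem_cons_self ..)) (by decide)
  · simp [hval]

theorem digitChar_val (d : Nat) (hd : d < 10) : (Nat.digitChar d).toNat - 48 = d := by
  interval_cases d <;> decide

theorem toDigits_foldl (n : Nat) : ∀ (a : Nat),
    (Nat.toDigits 10 n).foldl dstep a = a * 10 ^ (Nat.toDigits 10 n).length + n := by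
  induction n using Nat.strong_induction_on with
  | _ n ih =>
    intro a
    by_cases hn : n < 10
    · rw [Nat.toDigits_of_lt_base hn]
      simp [dstep, digitChar_val n hn]
    · rw [Nat.toDigits_eq_if (by norm_num) (n := n), if_neg hn]
      rw [List.foldl_append, List.length_append]
      have hdiv : n / 10 < n := Nat.div_lt_self (by omega) (by norm_num)
      rw [ih (n / 10) hdiv a]
      simp only [List.foldl_cons, List.foldl_nil, dstep, List.length_cons, List.length_nil]
      rw [digitChar_val (n % 10) (Nat.mod_lt _ (by norm_num))]
      have hmod : n / 10 * 10 + n % 10 = n := by omega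
      calc (a * 10 ^ (Nat.toDigits 10 (n / 10)).length + n / 10) * 10 + n % 10
          = a * (10 ^ (Nat.toDigits 10 (n / 10)).length * 10) + (n / 10 * 10 + n % 10) := by ring
        _ = a * 10 ^ ((Nat.toDigits 10 (n / 10)).length + (0 + 1)) + n := by
              rw [hmod]; ring_nf

theorem toDigits_all_digit (n : Nat) : ∀ c ∈ Nat.toDigits 10 n, c.isDigit = true :=
  fun c hc => Nat.isDigit_of_mem_toDigits (by norm_num) (by norm_num) hc

theorem toDigits_ne_nil (n : Nat) : Nat.toDigits 10 n ≠ [] := by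
  have := Nat.length_toDigits_pos (b := 10) (n := n)
  intro h; rw [h] at this; simp at this

-- concatenated decimal strings fold to the big-base accumulator
theorem flatten_foldl (l : List Nat) : ∀ (a : Nat),
    ((l.map (fun k => Nat.toDigits 10 k)).flatten).foldl dstep a =
      l.foldl (fun x k => x * 10 ^ (Nat.toDigits 10 k).length + k) a := by
  induction l with
  | nil => intro a; rfl
  | cons k tl ih =>
    intro a
    simp only [List.map_cons, List.flatten_cons, List.foldl_append, List.foldl_cons]
    rw [toDigits_foldl, ih]

-- fold with a guarded step = fold of the filtered list
theorem foldl_filter {α β : Type} (p : α → Bool) (g : β → α → β) (l : List α) (a : β) :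
    l.foldl (fun acc x => if p x then g acc x else acc) a = (l.filter p).foldl g a := by
  induction l generalizing a with
  | nil => rfl
  | cons x tl ih =>
    by_cases hx : p x <;> simp [hx, ih]

theorem intercalate_nil (l : List (List Char)) : List.intercalate [] l = l.flatten := by
  induction l with
  | nil => rfl
  | cons x tl ih =>
    cases tl with
    | nil => simp [List.intercalate]
    | cons y tl' =>
      simp only [List.intercalate, List.intersperse] at *
      simp_all

theorem toChars_nonneg (i : Int) (hi : 0 ≤ i) :
    PySem.Int.toChars i = Nat.toDigits 10 i.toNat := by
  simp [PySem.Int.toChars, not_lt.mpr hi]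

-- cast-commutation for the forward fold over the Nat index list
theorem foldF_cast (l : List Nat) : ∀ (a : Nat),
    ((l.foldl (fun x k => x * 10 ^ (Nat.toDigits 10 k).length + k) a : Nat) : Int) =
      l.foldl (fun x k => x * 10 ^ (Nat.toDigits 10 k).length + (k : Int)) (a : Int) := by
  induction l with
  | nil => intro a; rfl
  | cons k tl ih =>
    intro a
    simp only [List.foldl_cons]
    rw [ih]
    push_cast
    ring_nf

theorem flatten_toDigits_ne_nil (l : List Nat) (hne : l ≠ []) :
    (l.map (fun k => Nat.toDigits 10 k)).flatten ≠ [] := by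
  cases l with
  | nil => exact absurd rfl hne
  | cons k tl =>
    simp only [List.map_cons, List.flatten_cons, ne_eq, List.append_eq_nil_iff, not_and]
    intro h
    exact absurd h (toDigits_ne_nil k)

theorem flatten_toDigits_all_digit (l : List Nat) :
    ∀ c ∈ (l.map (fun k => Nat.toDigits 10 k)).flatten, c.isDigit = true := by
  intro c hc
  rw [List.mem_flatten] at hc
  obtain ⟨ds, hds, hcds⟩ := hc
  rw [List.mem_map] at hds
  obtain ⟨k, _, rfl⟩ := hds
  exact toDigits_all_digit k c hcds

-- the loop range as a mapped Nat range
theorem range_eq (A : List Int) :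
    PySem.List.pyRange 0 (PySem.List.len A - 1) =
      (List.range (A.length - 1)).map (fun (k : Nat) => (k : Int)) := by
  cases A with
  | nil => rfl
  | cons x tl =>
    have h1 : PySem.List.len (x :: tl) - 1 = ((x :: tl).length - 1 : Nat) := by
      rw [PySem.List.len_eq]; simp only [List.length_cons]; push_cast; omega
    rw [h1, PySem.List.pyRange_zero_natCast]

-- A's loop body appends i exactly when A[i] < A[i+1]
theorem stepA_eq (A : List Int) :
    (fun (result : List Int) (i : Int) =>
        let start : Int := 0
        if PySem.List.pyGetD A i 0 = PySem.List.pyGetD A (i + 1) 0 then result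
        else if PySem.List.pyGetD A i 0 < PySem.List.pyGetD A (i + 1) 0 then
          (if start = 0 then result ++ [i] else result)
        else result) =
      fun result i =>
        if decide (PySem.List.pyGetD A i 0 < PySem.List.pyGetD A (i + 1) 0) = true
        then result ++ [i] else result := by
  funext result i
  by_cases heq : PySem.List.pyGetD A i 0 = PySem.List.pyGetD A (i + 1) 0
  · simp [heq]
  · by_cases hlt : PySem.List.pyGetD A i 0 < PySem.List.pyGetD A (i + 1) 0 <;> simp [heq, hlt]

-- the filtered Int range is ascIdx, cast to Int
theorem filter_range_eq (A : List Int) :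
    ((List.range (A.length - 1)).map (fun (k : Nat) => (k : Int))).filter
        (fun i => decide (PySem.List.pyGetD A i 0 < PySem.List.pyGetD A (i + 1) 0)) =
      (ascIdx A).map (fun (k : Nat) => (k : Int)) := by
  rw [List.filter_map]
  unfold ascIdx
  congr 1
  apply List.filter_congr
  intro k _
  have h1 : PySem.List.pyGetD A (k : Int) 0 = A.getD k 0 := PySem.List.pyGetD_natCast A k 0
  have h2 : PySem.List.pyGetD A ((k : Int) + 1) 0 = A.getD (k + 1) 0 := by
    have hcast : ((k : Int) + 1) = ((k + 1 : Nat) : Int) := by push_cast; ring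
    rw [hcast, PySem.List.pyGetD_natCast]
  simp only [Function.comp_apply, h1, h2]

-- the collected index list of A's loop is ascIdx, cast to Int
theorem resultA_eq (A : List Int) :
    (PySem.List.pyRange 0 (PySem.List.len A - 1)).foldl
      (fun result i =>
        let start : Int := 0
        if PySem.List.pyGetD A i 0 = PySem.List.pyGetD A (i + 1) 0 then result
        else if PySem.List.pyGetD A i 0 < PySem.List.pyGetD A (i + 1) 0 then
          (if start = 0 then result ++ [i] else result)
        else result) [] =
      (ascIdx A).map (fun (k : Nat) => (k : Int)) := by
  rw [range_eq, stepA_eq]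
  rw [PySem.List.foldl_append_if
        (fun i => decide (PySem.List.pyGetD A i 0 < PySem.List.pyGetD A (i + 1) 0))
        (fun x => x)]
  rw [List.nil_append, List.map_id']
  exact filter_range_eq A

-- A's result is the forward positional fold over ascIdx
theorem solutionA_eq (A : List Int) (hne : ascIdx A ≠ []) :
    solution A =
      (ascIdx A).foldl
        (fun (x : Int) k => x * 10 ^ (Nat.toDigits 10 k).length + (k : Int)) 0 := by
  show (PySem.Int.ofStr? (PySem.Str.join "" (List.map PySem.Int.toStr
      ((PySem.List.pyRange 0 (PySem.List.len A - 1)).foldl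
        (fun result i =>
          let start : Int := 0
          if PySem.List.pyGetD A i 0 = PySem.List.pyGetD A (i + 1) 0 then result
          else if PySem.List.pyGetD A i 0 < PySem.List.pyGetD A (i + 1) 0 then
            (if start = 0 then result ++ [i] else result)
          else result) [])))).getD 0 = _
  rw [resultA_eq]
  have hjoin : (PySem.Str.join "" (((ascIdx A).map (fun (k : Nat) => (k : Int))).map PySem.Int.toStr)).toList =
      ((ascIdx A).map (fun k => Nat.toDigits 10 k)).flatten := by
    rw [PySem.Str.toList_join]
    show PySem.Chars.join [] _ = _
    simp only [PySem.Chars.join, intercalate_nil]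
    rw [List.map_map, List.map_map]
    congr 1
    apply List.map_congr_left
    intro k _
    simp only [Function.comp_apply, PySem.Int.toList_toStr]
    rw [toChars_nonneg _ (by positivity)]
    simp
  have hparse : PySem.Int.ofStr? (PySem.Str.join "" (((ascIdx A).map (fun (k : Nat) => (k : Int))).map PySem.Int.toStr)) =
      some ((((ascIdx A).map (fun k => Nat.toDigits 10 k)).flatten.foldl dstep 0 : Nat) : Int) := by
    rw [PySem.Int.ofStr?.eq_1, hjoin, ofChars?_eq]
    exact myOfChars?_digits _ (flatten_toDigits_ne_nil _ hne) (flatten_toDigits_all_digit _)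
  rw [hparse]
  simp only [Option.getD_some]
  rw [flatten_foldl, foldF_cast]
  rfl

-- digit length of str(i) for a cast Nat index
theorem strlen_cast (k : Nat) :
    (PySem.Str.len (PySem.Int.toStr (k : Int))).toNat = (Nat.toDigits 10 k).length := by
  rw [PySem.Str.len_eq, PySem.Int.toList_toStr, toChars_nonneg _ (by positivity)]
  simp

-- the forward fold shifts its initial accumulator by the total digit weight
theorem foldF_shift (l : List Nat) : ∀ (a : Int),
    l.foldl (fun (x : Int) k => x * 10 ^ (Nat.toDigits 10 k).length + (k : Int)) a =
      a * 10 ^ (l.map (fun k => (Nat.toDigits 10 k).length)).sum +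
        l.foldl (fun (x : Int) k => x * 10 ^ (Nat.toDigits 10 k).length + (k : Int)) 0 := by
  induction l with
  | nil => intro a; simp
  | cons k tl ih =>
    intro a
    simp only [List.foldl_cons, List.map_cons, List.sum_cons]
    rw [ih (a * 10 ^ (Nat.toDigits 10 k).length + (k : Int)),
        ih ((0 : Int) * 10 ^ (Nat.toDigits 10 k).length + (k : Int))]
    rw [pow_add]
    ring

-- B's right-to-left (total, weight) fold computes the forward fold and the total weight
theorem pairFold_eq (l : List Nat) :
    (l.map (fun (k : Nat) => (k : Int))).foldr
        (fun i (tw : Int × Int) =>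
          (tw.1 + i * tw.2, tw.2 * 10 ^ (PySem.Str.len (PySem.Int.toStr i)).toNat))
        ((0 : Int), (1 : Int)) =
      (l.foldl (fun (x : Int) k => x * 10 ^ (Nat.toDigits 10 k).length + (k : Int)) 0,
       (10 : Int) ^ (l.map (fun k => (Nat.toDigits 10 k).length)).sum) := by
  induction l with
  | nil => simp
  | cons k tl ih =>
    simp only [List.map_cons, List.foldr_cons, ih, List.foldl_cons, List.map_cons,
      List.sum_cons]
    rw [strlen_cast, Prod.mk.injEq]
    constructor
    case _ =>
      rw [foldF_shift tl ((0 : Int) * 10 ^ (Nat.toDigits 10 k).length + (k : Int))]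
      ring
    case _ =>
      rw [pow_add]
      ring

-- B's descending range is the reverse of A's ascending range
theorem rangeB_eq (A : List Int) :
    PySem.List.pyRange (PySem.List.len A - 2) (-1) (-1) =
      (PySem.List.pyRange 0 (PySem.List.len A - 1)).reverse := by
  rw [PySem.List.pyRange_neg_one_eq_reverse]
  have h1 : (-1 : Int) + 1 = 0 := by norm_num
  have h2 : PySem.List.len A - 2 + 1 = PySem.List.len A - 1 := by ring
  rw [h1, h2]

-- B's result is the forward positional fold over ascIdx (no precondition needed)
theorem solutionAlt_eq (A : List Int) :
    solution_alt A =
      (ascIdx A).foldl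
        (fun (x : Int) k => x * 10 ^ (Nat.toDigits 10 k).length + (k : Int)) 0 := by
  show ((PySem.List.pyRange (PySem.List.len A - 2) (-1) (-1)).foldl
      (fun (tw : Int × Int) i =>
        if PySem.List.pyGetD A i 0 < PySem.List.pyGetD A (i + 1) 0 then
          (tw.1 + i * tw.2, tw.2 * 10 ^ (PySem.Str.len (PySem.Int.toStr i)).toNat)
        else tw) (0, 1)).1 = _
  rw [rangeB_eq, range_eq]
  have hstep : (fun (tw : Int × Int) (i : Int) =>
      if PySem.List.pyGetD A i 0 < PySem.List.pyGetD A (i + 1) 0 then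
        (tw.1 + i * tw.2, tw.2 * 10 ^ (PySem.Str.len (PySem.Int.toStr i)).toNat)
      else tw) =
      fun tw i =>
        if decide (PySem.List.pyGetD A i 0 < PySem.List.pyGetD A (i + 1) 0) = true then
          (tw.1 + i * tw.2, tw.2 * 10 ^ (PySem.Str.len (PySem.Int.toStr i)).toNat)
        else tw := by
    funext tw i; simp
  rw [hstep, foldl_filter, List.filter_reverse, filter_range_eq, List.foldl_reverse,
      pairFold_eq]

-- ===== VERDICT (by name: the statement is the Claim_ definition above) =====
theorem solution_spec : Claim_equal_solution := by
  intro A _ hpre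
  unfold Spec_solution
  rw [solutionA_eq A hpre.1, solutionAlt_eq A]
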